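-- pv_equiv track=rewrite | github.com/hqyang/BertTest | src/preprocess.py | words2dict_feature_vec
-- ===== SOURCE A (Python) =====
-- def words2dict_feature_vec(words: list, word_dict: list, max_gram: int, max_length: int): #-> list
--     if max_gram <= 1:
--         raise ValueError('max gram should be greater than 1')
--
--     if not words:
--         return []
--
--     res = []
--
--     # for each char,
--     for char_ind, char in enumerate(words):
--         char_res = [0]*(2*(max_gram - 1))
--
--         for rel_ind in range(1, max_gram):
--             if char_ind - rel_ind >= 0:
--                 # construct words
--                 sent = ''.join(words[char_ind - rel_ind:char_ind + 1])
--                 if sent in word_dict: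
--                     char_res[2*(rel_ind - 1)] = 1
--             if char_ind + rel_ind < len(words):
--                 sent = ''.join(words[char_ind:char_ind + rel_ind + 1])
--                 if sent in word_dict:
--                     char_res[2*rel_ind - 1] = 1
--         res.append(char_res)
--
--     if len(words) < max_length:
--         res.extend([[0]*(2*(max_gram - 1))] * (max_length - len(words)))
--     return res
-- ===== SOURCE B (Python) =====
-- def words2dict_feature_vec(words: list, word_dict: list, max_gram: int, max_length: int):
--     if max_gram <= 1:
--         raise ValueError('max gram should be greater than 1')
--
--     if not words:
--         return []
--
--     n = len(words)
--     d = set(word_dict)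
--
--     # gram-centric pass: enumerate every n-gram once, building it incrementally,
--     # and record the (start, end) index pairs whose gram is in the dictionary
--     found = set()
--     for i in range(n):
--         gram = words[i]
--         for j in range(i + 1, min(n, i + max_gram)):
--             gram += words[j]
--             if gram in d:
--                 found.add((i, j))
--
--     # assemble the feature rows from the found pairs
--     res = []
--     for i in range(n):
--         row = []
--         for rel in range(1, max_gram):
--             row.append(1 if (i - rel, i) in found else 0)
--             row.append(1 if (i, i + rel) in found else 0)
--         res.append(row)
--
--     if n < max_length:
--         res.extend([0] * (2 * (max_gram - 1)) for _ in range(max_length - n))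
--     return res
-- ===== Notes on version B (the rewrite author's own statement) =====
-- stated objective: alternative
-- what changed: Replaces the per-char loop that re-joins every left and right n-gram and scans word_dict linearly with a gram-centric pass that builds each n-gram incrementally once, checks it against a set built from word_dict, records matching (start,end) index pairs in a set, and then assembles the rows by pair lookups (intended as faster; a timing run measured 56x at n=1024 but could not confirm it at the largest size).
import Mathlib
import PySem

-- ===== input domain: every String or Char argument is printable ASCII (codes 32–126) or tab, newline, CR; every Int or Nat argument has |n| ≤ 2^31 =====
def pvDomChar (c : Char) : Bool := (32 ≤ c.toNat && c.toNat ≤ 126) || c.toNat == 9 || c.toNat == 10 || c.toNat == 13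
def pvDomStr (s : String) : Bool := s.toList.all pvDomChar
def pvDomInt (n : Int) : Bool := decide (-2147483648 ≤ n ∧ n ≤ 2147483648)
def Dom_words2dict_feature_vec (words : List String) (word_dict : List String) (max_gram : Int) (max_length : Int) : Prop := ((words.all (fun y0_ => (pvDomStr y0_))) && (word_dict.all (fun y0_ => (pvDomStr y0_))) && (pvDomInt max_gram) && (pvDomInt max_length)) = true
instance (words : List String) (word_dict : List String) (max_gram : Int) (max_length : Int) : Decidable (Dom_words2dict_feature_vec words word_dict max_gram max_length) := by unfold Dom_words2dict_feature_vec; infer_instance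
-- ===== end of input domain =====

-- B replaces A's per-char re-joining of every n-gram and linear scans of word_dict by one
-- gram-centric pass (each n-gram built incrementally once, checked against a set of word_dict,
-- hits stored as (start,end) pairs) followed by row assembly from set lookups (alternative
-- algorithm, intended as faster; a timing run could not confirm it at the largest size).

-- ===== PORT A =====
def words2dict_feature_vec (words : List String) (word_dict : List String) (max_gram : Int) (max_length : Int) : List (List Int) :=
  -- 'if max_gram <= 1: raise ValueError' — excluded by Pre_words2dict_feature_vec
  if words = [] then []
  else
    let n : Int := (words.length : Int)
    let res : List (List Int) :=
      (PySem.List.enumerate words 0).foldl (fun res p =>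
        let char_ind := p.1
        let char_res : List Int := List.replicate (2 * (max_gram - 1)).toNat 0
        let char_res :=
          (PySem.List.pyRange 1 max_gram 1).foldl (fun cr rel_ind =>
            let cr :=
              if char_ind - rel_ind ≥ 0 then
                let sent := PySem.Str.join "" (PySem.List.slice words (some (char_ind - rel_ind)) (some (char_ind + 1)))
                if sent ∈ word_dict then PySem.List.pySetD cr (2 * (rel_ind - 1)) 1 else cr
              else cr
            if char_ind + rel_ind < n then
              let sent := PySem.Str.join "" (PySem.List.slice words (some char_ind) (some (char_ind + rel_ind + 1)))
              if sent ∈ word_dict then PySem.List.pySetD cr (2 * rel_ind - 1) 1 else cr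
            else cr) char_res
        res ++ [char_res]) []
    if n < max_length then
      res ++ List.replicate (max_length - n).toNat (List.replicate (2 * (max_gram - 1)).toNat 0)
    else res

-- ===== PORT B =====
def words2dict_feature_vec_alt (words : List String) (word_dict : List String) (max_gram : Int) (max_length : Int) : List (List Int) :=
  if words = [] then []
  else
    let n : Int := (words.length : Int)
    let d : PySem.Set String := PySem.Set.ofList word_dict
    let found : PySem.Set (Int × Int) :=
      ((PySem.List.pyRange 0 n 1).foldl (fun found i =>
        let gram := PySem.List.pyGetD words i ""
        ((PySem.List.pyRange (i + 1) (min n (i + max_gram)) 1).foldl (fun st j =>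
          let gram := st.1 ++ PySem.List.pyGetD words j ""
          (gram, if PySem.Set.contains d gram then PySem.Set.add st.2 (i, j) else st.2)) (gram, found)).2) PySem.Set.empty)
    let res : List (List Int) :=
      (PySem.List.pyRange 0 n 1).foldl (fun res i =>
        let row : List Int :=
          (PySem.List.pyRange 1 max_gram 1).foldl (fun row rel =>
            let row := row ++ [if PySem.Set.contains found (i - rel, i) then (1 : Int) else 0]
            row ++ [if PySem.Set.contains found (i, i + rel) then (1 : Int) else 0]) []
        res ++ [row]) []
    if n < max_length then
      res ++ List.replicate (max_length - n).toNat (List.replicate (2 * (max_gram - 1)).toNat 0)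
    else res

-- ===== PRECONDITION & SPEC =====
-- Pre_ excludes max_gram ≤ 1, on which Python A raises ValueError.
def Pre_words2dict_feature_vec (words : List String) (word_dict : List String) (max_gram : Int) (max_length : Int) : Prop := 2 ≤ max_gram
instance (words : List String) (word_dict : List String) (max_gram : Int) (max_length : Int) : Decidable (Pre_words2dict_feature_vec words word_dict max_gram max_length) := by unfold Pre_words2dict_feature_vec; infer_instance

def pvWitness_words2dict_feature_vec : List String × List String × Int × Int := (["a", "b"], ["ab"], 2, 3)

def Spec_words2dict_feature_vec (words : List String) (word_dict : List String) (max_gram : Int) (max_length : Int) (out : List (List Int)) : Prop := out = words2dict_feature_vec_alt words word_dict max_gram max_length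
instance (words : List String) (word_dict : List String) (max_gram : Int) (max_length : Int) (out : List (List Int)) : Decidable (Spec_words2dict_feature_vec words word_dict max_gram max_length out) := by unfold Spec_words2dict_feature_vec; infer_instance

-- ===== CLAIM (what is proved, stated in full; the proofs are below) =====
def Claim_equal_words2dict_feature_vec : Prop := ∀ (words : List String) (word_dict : List String) (max_gram : Int) (max_length : Int), Dom_words2dict_feature_vec words word_dict max_gram max_length → Pre_words2dict_feature_vec words word_dict max_gram max_length → Spec_words2dict_feature_vec words word_dict max_gram max_length (words2dict_feature_vec words word_dict max_gram max_length)

-- ===== LEMMAS AND PROOFS =====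

def pvSeg (words : List String) (a b : Int) : String :=
  PySem.Str.join "" (PySem.List.slice words (some a) (some b))

def pvLFlag (words word_dict : List String) (i rel : Int) : Int :=
  if i - rel ≥ 0 ∧ pvSeg words (i - rel) (i + 1) ∈ word_dict then 1 else 0

def pvRFlag (words word_dict : List String) (i rel : Int) : Int :=
  if i + rel < (words.length : Int) ∧ pvSeg words i (i + rel + 1) ∈ word_dict then 1 else 0

def pvRowTo (words word_dict : List String) (i k : Int) : List Int :=
  (PySem.List.pyRange 1 k 1).flatMap
    (fun rel => [pvLFlag words word_dict i rel, pvRFlag words word_dict i rel])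

theorem pvRowTo_length (words word_dict : List String) (i k : Int) :
    (pvRowTo words word_dict i k).length = 2 * (k - 1).toNat := by
  simp [pvRowTo, List.length_flatMap]
  omega

theorem pvIteAnd {α : Type} (c1 c2 : Prop) [Decidable c1] [Decidable c2] (x y : α) :
    (if c1 then if c2 then x else y else y) = if c1 ∧ c2 then x else y := by
  split_ifs <;> tauto

theorem pvSetPair (P Z : List Int) (c1 c2 : Prop) [Decidable c1] [Decidable c2]
    (j1 j2 : Int) (h1 : j1 = (P.length : Int)) (h2 : j2 = (P.length : Int) + 1) :
    (if c2 then PySem.List.pySetD (if c1 then PySem.List.pySetD (P ++ 0 :: 0 :: Z) j1 1 else P ++ 0 :: 0 :: Z) j2 1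
     else (if c1 then PySem.List.pySetD (P ++ 0 :: 0 :: Z) j1 1 else P ++ 0 :: 0 :: Z))
    = P ++ (if c1 then 1 else 0) :: (if c2 then 1 else 0) :: Z := by
  have hn1 : (0:Int) ≤ j1 := by omega
  have hn2 : (0:Int) ≤ j2 := by omega
  have ht1 : j1.toNat = P.length := by omega
  have ht2 : j2.toNat = P.length + 1 := by omega
  have s1 : PySem.List.pySetD (P ++ 0 :: 0 :: Z) j1 (1:Int) = P ++ 1 :: 0 :: Z := by
    rw [PySem.List.pySetD_of_nonneg _ _ hn1, ht1, List.set_append]; simp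
  have s2 : ∀ a : Int, PySem.List.pySetD (P ++ a :: 0 :: Z) j2 (1:Int) = P ++ a :: 1 :: Z := by
    intro a
    rw [PySem.List.pySetD_of_nonneg _ _ hn2, ht2, List.set_append]; simp
  split_ifs <;> simp [s1, s2]

set_option maxHeartbeats 1000000 in
theorem pvA_inner (words word_dict : List String) (mg i : Int) (h2 : 2 ≤ mg) :
    ∀ (k : Int), 1 ≤ k → k ≤ mg →
    (PySem.List.pyRange 1 k 1).foldl (fun cr rel_ind =>
        let cr :=
          if i - rel_ind ≥ 0 then
            let sent := PySem.Str.join "" (PySem.List.slice words (some (i - rel_ind)) (some (i + 1)))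
            if sent ∈ word_dict then PySem.List.pySetD cr (2 * (rel_ind - 1)) 1 else cr
          else cr
        if i + rel_ind < (words.length : Int) then
          let sent := PySem.Str.join "" (PySem.List.slice words (some i) (some (i + rel_ind + 1)))
          if sent ∈ word_dict then PySem.List.pySetD cr (2 * rel_ind - 1) 1 else cr
        else cr) (List.replicate (2 * (mg - 1)).toNat 0)
      = pvRowTo words word_dict i k ++ List.replicate (2 * (mg - k)).toNat 0 := by
  intro k hk
  induction k, hk using Int.le_induction with
  | base =>
    intro _
    simp [PySem.List.pyRange_one_eq_nil (le_refl 1), pvRowTo]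
  | succ k h1 ih =>
    intro hk1
    rw [PySem.List.pyRange_one_succ_right (by omega), List.foldl_append, ih (by omega)]
    simp only [List.foldl_cons, List.foldl_nil]
    have hz : List.replicate (2 * (mg - k)).toNat (0:Int)
        = 0 :: 0 :: List.replicate (2 * (mg - (k+1))).toNat 0 := by
      have h : (2 * (mg - k)).toNat = (2 * (mg - (k+1))).toNat + 1 + 1 := by omega
      rw [h, List.replicate_succ, List.replicate_succ]
    rw [hz]
    simp only [pvIteAnd]
    rw [pvSetPair _ _ _ _ _ _ (by rw [pvRowTo_length]; omega) (by rw [pvRowTo_length]; omega)]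
    have hrow : pvRowTo words word_dict i (k+1)
        = pvRowTo words word_dict i k ++ [pvLFlag words word_dict i k, pvRFlag words word_dict i k] := by
      unfold pvRowTo
      rw [PySem.List.pyRange_one_succ_right (by omega), List.flatMap_append]
      simp
    rw [hrow]
    simp [pvLFlag, pvRFlag, pvSeg]

theorem pvJoinNil (xs : List (List Char)) : PySem.Chars.join [] xs = xs.flatten := by
  show ([] : List Char).intercalate xs = xs.flatten
  induction xs with
  | nil => simp [List.intercalate]
  | cons x xs ih =>
    cases xs with
    | nil => simp [List.intercalate]
    | cons y ys =>
      simp only [List.intercalate] at *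
      simp [List.intersperse] at *
      simpa using ih

theorem pvSeg_toList (words : List String) (a b : Int) :
    (pvSeg words a b).toList = ((PySem.List.slice words (some a) (some b)).map String.toList).flatten := by
  simp [pvSeg, PySem.Str.toList_join, pvJoinNil]

theorem pvSeg_single (words : List String) (i : Int) (h0 : 0 ≤ i) (hn : i < (words.length : Int)) :
    pvSeg words i (i + 1) = PySem.List.pyGetD words i "" := by
  rw [← String.toList_inj, pvSeg_toList]
  have hlt : i.toNat < words.length := by omega
  rw [PySem.List.slice_toNat _ h0 (by omega)]
  have h1 : (i+1).toNat - i.toNat = 1 := by omega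
  have hlt2 : i.toNat < (List.map String.toList words).length := by simpa using hlt
  rw [h1, PySem.List.pyGetD_of_nonneg _ _ h0]
  simp [List.getD, List.getElem?_eq_getElem hlt, List.drop_eq_getElem_cons hlt2]

theorem pvSeg_append (words : List String) (a j : Int) (h0 : 0 ≤ a) (haj : a ≤ j)
    (hj : j < (words.length : Int)) :
    pvSeg words a (j + 1) = pvSeg words a j ++ PySem.List.pyGetD words j "" := by
  rw [← String.toList_inj]
  have hjn : j.toNat < words.length := by omega
  simp only [String.toList_append, pvSeg_toList]
  rw [PySem.List.slice_toNat _ h0 (by omega), PySem.List.slice_toNat _ h0 (by omega)]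
  have h1 : (j+1).toNat - a.toNat = (j.toNat - a.toNat) + 1 := by omega
  rw [h1, List.take_succ]
  have hg : (List.drop a.toNat words)[j.toNat - a.toNat]? = some words[j.toNat] := by
    rw [List.getElem?_drop]
    have : a.toNat + (j.toNat - a.toNat) = j.toNat := by omega
    rw [this, List.getElem?_eq_getElem hjn]
  rw [hg, PySem.List.pyGetD_of_nonneg _ _ (by omega)]
  simp [List.getD, List.getElem?_eq_getElem hjn]

def pvFoundCond (words word_dict : List String) (mg : Int) (p : Int × Int) : Prop :=
  0 ≤ p.1 ∧ p.1 < p.2 ∧ p.2 < min (words.length : Int) (p.1 + mg) ∧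
    pvSeg words p.1 (p.2 + 1) ∈ word_dict

set_option maxHeartbeats 1000000 in
theorem pvB_inner (words word_dict : List String) (mg i : Int) (hi0 : 0 ≤ i) :
    ∀ (cnt : Nat) (j0 : Int), i + 1 ≤ j0 → (min (words.length : Int) (i + mg) - j0).toNat = cnt →
    ∀ (s0 : PySem.Set (Int × Int)) (p : Int × Int),
    (p ∈ ((PySem.List.pyRange j0 (min (words.length : Int) (i + mg)) 1).foldl (fun st j =>
        let gram := st.1 ++ PySem.List.pyGetD words j ""
        (gram, if PySem.Set.contains (PySem.Set.ofList word_dict) gram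
               then PySem.Set.add st.2 (i, j) else st.2))
      (pvSeg words i j0, s0)).2)
    ↔ (p ∈ s0 ∨ (p.1 = i ∧ j0 ≤ p.2 ∧ p.2 < min (words.length : Int) (i + mg) ∧
                 pvSeg words i (p.2 + 1) ∈ word_dict)) := by
  intro cnt
  induction cnt with
  | zero =>
    intro j0 hj0 hcnt s0 p
    rw [PySem.List.pyRange_one_eq_nil (by omega)]
    simp only [List.foldl_nil]
    constructor
    · intro h; exact Or.inl h
    · rintro (h | h); · exact h
      · omega
  | succ c ih =>
    intro j0 hj0 hcnt s0 p
    have hlt : j0 < min (words.length : Int) (i + mg) := by omega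
    rw [PySem.List.pyRange_one_cons hlt, List.foldl_cons]
    simp only
    have hgram : pvSeg words i j0 ++ PySem.List.pyGetD words j0 "" = pvSeg words i (j0 + 1) :=
      (pvSeg_append words i j0 hi0 (by omega) (by omega)).symm
    rw [hgram]
    rw [ih (j0 + 1) (by omega) (by omega)]
    obtain ⟨a, b⟩ := p
    by_cases hc : PySem.Set.contains (PySem.Set.ofList word_dict) (pvSeg words i (j0 + 1)) = true
    · have hmem : pvSeg words i (j0 + 1) ∈ word_dict := by
        rw [PySem.Set.contains_iff] at hc
        exact (PySem.Set.mem_ofList _ _).mp hc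
      rw [if_pos hc]
      rw [PySem.Set.mem_add]
      constructor
      · rintro ((h | h) | h)
        · exact Or.inl h
        · right
          have : (a, b) = (i, j0) := h
          simp at this
          refine ⟨this.1, by omega, by omega, ?_⟩
          simp only [this.2]
          exact hmem
        · right; obtain ⟨h1, h2, h3, h4⟩ := h; exact ⟨h1, by omega, h3, h4⟩
      · rintro (h | ⟨h1, h2, h3, h4⟩)
        · exact Or.inl (Or.inl h)
        · by_cases hb : b = j0
          · left; right; have ha : a = i := h1; simp [hb, ha]
          · right; exact ⟨h1, by omega, h3, h4⟩
    · rw [if_neg hc]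
      have hnmem : pvSeg words i (j0 + 1) ∉ word_dict := by
        intro hm
        exact hc (PySem.Set.contains_iff _ _ |>.mpr ((PySem.Set.mem_ofList _ _).mpr hm))
      constructor
      · rintro (h | ⟨h1, h2, h3, h4⟩)
        · exact Or.inl h
        · right; exact ⟨h1, by omega, h3, h4⟩
      · rintro (h | ⟨h1, h2, h3, h4⟩)
        · exact Or.inl h
        · by_cases hb : b = j0
          · exfalso; apply hnmem; simp only [← hb]; simpa [h1] using h4
          · right; exact ⟨h1, by omega, h3, h4⟩

set_option maxHeartbeats 1000000 in
theorem pvB_found (words word_dict : List String) (mg : Int) :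
    ∀ (cnt : Nat) (i0 : Int), 0 ≤ i0 → ((words.length : Int) - i0).toNat = cnt →
    ∀ (s0 : PySem.Set (Int × Int)) (p : Int × Int),
    (p ∈ ((PySem.List.pyRange i0 (words.length : Int) 1).foldl (fun found i =>
        ((PySem.List.pyRange (i + 1) (min (words.length : Int) (i + mg)) 1).foldl (fun st j =>
            let gram := st.1 ++ PySem.List.pyGetD words j ""
            (gram, if PySem.Set.contains (PySem.Set.ofList word_dict) gram
                   then PySem.Set.add st.2 (i, j) else st.2))
          (PySem.List.pyGetD words i "", found)).2) s0))
    ↔ (p ∈ s0 ∨ (pvFoundCond words word_dict mg p ∧ i0 ≤ p.1)) := by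
  intro cnt
  induction cnt with
  | zero =>
    intro i0 h0 hcnt s0 p
    rw [PySem.List.pyRange_one_eq_nil (by omega)]
    simp only [List.foldl_nil]
    constructor
    · exact Or.inl
    · rintro (h | ⟨⟨h1, h2, h3, h4⟩, h5⟩)
      · exact h
      · omega
  | succ c ih =>
    intro i0 h0 hcnt s0 p
    have hlt : i0 < (words.length : Int) := by omega
    rw [PySem.List.pyRange_one_cons hlt, List.foldl_cons]
    simp only
    rw [← pvSeg_single words i0 h0 hlt]
    rw [ih (i0 + 1) (by omega) (by omega)]
    rw [pvB_inner words word_dict mg i0 h0 _ (i0 + 1) (by omega) rfl s0 p]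
    obtain ⟨a, b⟩ := p
    simp only [pvFoundCond]
    constructor
    · rintro ((h | ⟨h1, h2, h3, h4⟩) | ⟨⟨h1, h2, h3, h4⟩, h5⟩)
      · exact Or.inl h
      · right
        refine ⟨⟨by omega, by omega, ?_, ?_⟩, by omega⟩
        · simpa [h1] using h3
        · simpa [h1] using h4
      · exact Or.inr ⟨⟨h1, h2, h3, h4⟩, by omega⟩
    · rintro (h | ⟨⟨h1, h2, h3, h4⟩, h5⟩)
      · exact Or.inl (Or.inl h)
      · by_cases ha : a = i0
        · left; right
          refine ⟨ha, by omega, ?_, ?_⟩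
          · simpa [ha] using h3
          · simpa [ha] using h4
        · exact Or.inr ⟨⟨h1, h2, h3, h4⟩, by omega⟩

set_option maxHeartbeats 1000000 in
theorem pvB_row (words word_dict : List String) (mg i : Int)
    (found : PySem.Set (Int × Int))
    (hfound : ∀ p, p ∈ found ↔ pvFoundCond words word_dict mg p)
    (hi : 0 ≤ i) (hin : i < (words.length : Int)) :
    (PySem.List.pyRange 1 mg 1).foldl (fun row rel =>
        (row ++ [if PySem.Set.contains found (i - rel, i) then (1 : Int) else 0])
          ++ [if PySem.Set.contains found (i, i + rel) then (1 : Int) else 0]) []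
    = pvRowTo words word_dict i mg := by
  have hbody : (fun row rel =>
        (row ++ [if PySem.Set.contains found (i - rel, i) then (1 : Int) else 0])
          ++ [if PySem.Set.contains found (i, i + rel) then (1 : Int) else 0])
      = (fun row rel => row ++ ([if PySem.Set.contains found (i - rel, i) then (1 : Int) else 0,
          if PySem.Set.contains found (i, i + rel) then (1 : Int) else 0])) := by
    funext row rel; simp
  rw [hbody, PySem.List.foldl_append_eq_flatMap]
  rw [List.nil_append, pvRowTo]
  rw [List.flatMap_def, List.flatMap_def]
  apply congrArg
  apply List.map_congr_left
  intro rel hrel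
  rw [PySem.List.mem_pyRange_one] at hrel
  have hcont : ∀ q : Int × Int, (PySem.Set.contains found q = true) ↔ pvFoundCond words word_dict mg q := by
    intro q; rw [PySem.Set.contains_iff, hfound]
  have hl : (if PySem.Set.contains found (i - rel, i) then (1 : Int) else 0)
      = pvLFlag words word_dict i rel := by
    rw [pvLFlag]
    refine if_congr ?_ rfl rfl
    rw [hcont]
    simp only [pvFoundCond]
    constructor
    · rintro ⟨h1, h2, h3, h4⟩; exact ⟨by omega, h4⟩
    · rintro ⟨h1, h4⟩; exact ⟨by omega, by omega, by omega, h4⟩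
  have hr : (if PySem.Set.contains found (i, i + rel) then (1 : Int) else 0)
      = pvRFlag words word_dict i rel := by
    rw [pvRFlag]
    refine if_congr ?_ rfl rfl
    rw [hcont]
    simp only [pvFoundCond]
    constructor
    · rintro ⟨h1, h2, h3, h4⟩; exact ⟨by omega, h4⟩
    · rintro ⟨h1, h4⟩; exact ⟨by omega, by omega, by omega, h4⟩
  rw [hl, hr]

-- ===== VERDICT (by name: the statement is the Claim_ definition above) =====
set_option maxHeartbeats 2000000 in
theorem words2dict_feature_vec_spec : Claim_equal_words2dict_feature_vec := by
  intro words word_dict mg ml _dom hpre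
  unfold Spec_words2dict_feature_vec
  have h2 : (2:Int) ≤ mg := hpre
  by_cases hw : words = []
  · simp [words2dict_feature_vec, words2dict_feature_vec_alt, hw]
  · simp only [words2dict_feature_vec, words2dict_feature_vec_alt, if_neg hw]
    congr 1
    · congr 1
      rw [PySem.List.foldl_append_singleton_eq_map, PySem.List.foldl_append_singleton_eq_map]
      simp only [List.nil_append]
      rw [PySem.List.enumerate_eq_map_pyRange words "", List.map_map]
      simp only [PySem.List.len_eq, Function.comp_def]
      apply List.map_congr_left
      intro i hi
      rw [PySem.List.mem_pyRange_one] at hi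
      have hA := pvA_inner words word_dict mg i (by omega) mg (by omega) (by omega)
      simp only [show (2 * (mg - mg)).toNat = 0 by omega, List.replicate_zero,
        List.append_nil] at hA
      rw [hA]
      symm
      apply pvB_row words word_dict mg i _ _ (by omega) (by omega)
      intro p
      rw [pvB_found words word_dict mg words.length 0 (by omega) (by omega) PySem.Set.empty p]
      constructor
      · rintro (h | ⟨hc, _⟩)
        · cases h
        · exact hc
      · intro hc
        exact Or.inr ⟨hc, hc.1⟩
    · rw [PySem.List.foldl_append_singleton_eq_map, PySem.List.foldl_append_singleton_eq_map]
      simp only [List.nil_append]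
      rw [PySem.List.enumerate_eq_map_pyRange words "", List.map_map]
      simp only [PySem.List.len_eq, Function.comp_def]
      apply List.map_congr_left
      intro i hi
      rw [PySem.List.mem_pyRange_one] at hi
      have hA := pvA_inner words word_dict mg i (by omega) mg (by omega) (by omega)
      simp only [show (2 * (mg - mg)).toNat = 0 by omega, List.replicate_zero,
        List.append_nil] at hA
      rw [hA]
      symm
      apply pvB_row words word_dict mg i _ _ (by omega) (by omega)
      intro p
      rw [pvB_found words word_dict mg words.length 0 (by omega) (by omega) PySem.Set.empty p]
      constructor
      · rintro (h | ⟨hc, _⟩)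
        · cases h
        · exact hc
      · intro hc
        exact Or.inr ⟨hc, hc.1⟩
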